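-- pv_equiv track=rewrite | github.com/CircleRadon/Osprey | osprey/data_generation/generate_gpt_prompt.py | generate_gpt_prompt_cat
-- ===== SOURCE A (Python) =====
-- def generate_region_str(num_boxes):
--     region_str = ''
--     for i in range(num_boxes):
--         region_str += '<region{}>'.format(i+1)
--         if i<num_boxes-2:
--             region_str += ', '
--         elif i==num_boxes-2:
--             region_str += ' and '
--     return region_str
--
-- def generate_gpt_prompt_cat(llava_desc, coco_gpt_format, caption_gpt_format, num_boxes, coco_cap_anns):
--     prompt = ''
--     if llava_desc is not None:
--         prompt += 'The detailed description of this image:\n' + '"' + llava_desc + '"' + '\n'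
--     else:
--         prompt += 'Several descriptions of this image:\n'
--         for coco_cap in coco_cap_anns:
--             prompt += coco_cap + '\n'
--     prompt += '\n'
--     mid_str = 'Specially, there are {} special regions: '.format(str(num_boxes))
--     region_str = generate_region_str(num_boxes)
--     mid_str += region_str +'.'
--     prompt += mid_str+'\n'
--     prompt += caption_gpt_format
--     return prompt
-- ===== SOURCE B (Python) =====
-- def generate_gpt_prompt_cat(llava_desc, coco_gpt_format, caption_gpt_format, num_boxes, coco_cap_anns):
--     # Region list built BACK-TO-FRONT: collect the pieces starting from the tail
--     # '<regionN>' then '<regionN-1> and ', then '<regioni>, ' for i = num_boxes-2 .. 1,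
--     # and join them once in reversed order.
--     pieces = []
--     if num_boxes > 0:
--         pieces.append('<region{}>'.format(num_boxes))
--         if num_boxes >= 2:
--             pieces.append('<region{}> and '.format(num_boxes - 1))
--         for i in range(num_boxes - 2, 0, -1):
--             pieces.append('<region{}>, '.format(i))
--     region_str = ''.join(reversed(pieces))
--     if llava_desc is not None:
--         header = 'The detailed description of this image:\n"{}"\n'.format(llava_desc)
--     else:
--         header = 'Several descriptions of this image:\n' + ''.join(c + '\n' for c in coco_cap_anns)
--     return ''.join([header, '\n',
--                     'Specially, there are {} special regions: '.format(num_boxes),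
--                     region_str, '.\n', caption_gpt_format])
-- ===== Notes on version B (the rewrite author's own statement) =====
-- stated objective: alternative
-- what changed: The region string is built back-to-front: B collects the pieces starting from the final '<regionN>' token and the '<regionN-1> and ' tail, then a countdown loop appends '<regioni>, ' for i from num_boxes-2 down to 1, and one ''.join over the reversed piece list produces the string, instead of A's forward loop that appends each token and then picks its separator by comparing the index to num_boxes-2; the prompt itself is assembled as one ''.join over its segments instead of repeated '+='.
import Mathlib
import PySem

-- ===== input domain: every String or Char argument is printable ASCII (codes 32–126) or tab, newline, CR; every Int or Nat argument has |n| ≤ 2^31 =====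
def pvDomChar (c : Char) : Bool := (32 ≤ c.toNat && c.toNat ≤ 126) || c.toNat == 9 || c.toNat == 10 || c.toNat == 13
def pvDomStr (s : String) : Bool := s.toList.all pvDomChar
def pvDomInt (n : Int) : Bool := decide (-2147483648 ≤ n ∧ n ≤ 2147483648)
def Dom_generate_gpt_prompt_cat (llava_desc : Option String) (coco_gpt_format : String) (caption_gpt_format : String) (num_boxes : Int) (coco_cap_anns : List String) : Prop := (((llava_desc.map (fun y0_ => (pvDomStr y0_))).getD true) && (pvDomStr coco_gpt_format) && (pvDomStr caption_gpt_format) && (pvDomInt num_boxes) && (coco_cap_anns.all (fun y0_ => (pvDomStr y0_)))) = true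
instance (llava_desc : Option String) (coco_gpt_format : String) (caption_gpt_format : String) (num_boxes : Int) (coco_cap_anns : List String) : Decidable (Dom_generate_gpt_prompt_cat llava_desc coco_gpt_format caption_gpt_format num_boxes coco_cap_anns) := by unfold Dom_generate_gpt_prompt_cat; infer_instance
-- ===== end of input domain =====

-- B builds the region list BACK-TO-FRONT (seed '<regionN-1> and <regionN>' tail, countdown loop
-- prepending '<regioni>, ') instead of A's forward append-then-pick-separator loop; objective: alternative.

-- ===== PORT A =====
-- A's helper generate_region_str: forward accumulating loop, separator chosen by comparing i to num_boxes-2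
def pvRegionStrA (num_boxes : Int) : String :=
  (PySem.List.pyRange 0 num_boxes 1).foldl
    (fun region_str i =>
      let region_str := region_str ++ "<region" ++ PySem.Int.toStr (i + 1) ++ ">"
      if i < num_boxes - 2 then region_str ++ ", "
      else if i = num_boxes - 2 then region_str ++ " and "
      else region_str)
    ""

def generate_gpt_prompt_cat (llava_desc : Option String) (coco_gpt_format : String) (caption_gpt_format : String) (num_boxes : Int) (coco_cap_anns : List String) : String :=
  let prompt := ""
  let prompt :=
    match llava_desc with
    | some d => prompt ++ "The detailed description of this image:\n" ++ "\"" ++ d ++ "\"" ++ "\n"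
    | none =>
        coco_cap_anns.foldl (fun p coco_cap => p ++ coco_cap ++ "\n")
          (prompt ++ "Several descriptions of this image:\n")
  let prompt := prompt ++ "\n"
  let mid_str := "Specially, there are " ++ PySem.Int.toStr num_boxes ++ " special regions: "
  let region_str := pvRegionStrA num_boxes
  let mid_str := mid_str ++ region_str ++ "."
  let prompt := prompt ++ mid_str ++ "\n"
  prompt ++ caption_gpt_format

-- ===== PORT B =====
-- back-to-front region construction: collect pieces from the tail, countdown loop, one reversed join
def pvRegionStrB (num_boxes : Int) : String :=
  let pieces : List String :=
    if 0 < num_boxes then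
      let pieces := ["<region" ++ PySem.Int.toStr num_boxes ++ ">"]
      let pieces :=
        if 2 ≤ num_boxes then
          pieces ++ ["<region" ++ PySem.Int.toStr (num_boxes - 1) ++ "> and "]
        else pieces
      (PySem.List.pyRange (num_boxes - 2) 0 (-1)).foldl
        (fun ps i => ps ++ ["<region" ++ PySem.Int.toStr i ++ ">, "]) pieces
    else []
  PySem.Str.join "" pieces.reverse

def generate_gpt_prompt_cat_alt (llava_desc : Option String) (coco_gpt_format : String) (caption_gpt_format : String) (num_boxes : Int) (coco_cap_anns : List String) : String :=
  let region_str := pvRegionStrB num_boxes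
  let header :=
    match llava_desc with
    | some d => "The detailed description of this image:\n\"" ++ d ++ "\"\n"
    | none =>
        "Several descriptions of this image:\n" ++
          PySem.Str.join "" (coco_cap_anns.map (fun c => c ++ "\n"))
  PySem.Str.join ""
    [header, "\n", "Specially, there are " ++ PySem.Int.toStr num_boxes ++ " special regions: ",
     region_str, ".\n", caption_gpt_format]

-- ===== PRECONDITION & SPEC =====
def Spec_generate_gpt_prompt_cat (llava_desc : Option String) (coco_gpt_format : String) (caption_gpt_format : String) (num_boxes : Int) (coco_cap_anns : List String) (out : String) : Prop := out = generate_gpt_prompt_cat_alt llava_desc coco_gpt_format caption_gpt_format num_boxes coco_cap_anns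
instance (llava_desc : Option String) (coco_gpt_format : String) (caption_gpt_format : String) (num_boxes : Int) (coco_cap_anns : List String) (out : String) : Decidable (Spec_generate_gpt_prompt_cat llava_desc coco_gpt_format caption_gpt_format num_boxes coco_cap_anns out) := by unfold Spec_generate_gpt_prompt_cat; infer_instance

-- ===== CLAIM =====
def Claim_equal_generate_gpt_prompt_cat : Prop := ∀ (llava_desc : Option String) (coco_gpt_format : String) (caption_gpt_format : String) (num_boxes : Int) (coco_cap_anns : List String), Dom_generate_gpt_prompt_cat llava_desc coco_gpt_format caption_gpt_format num_boxes coco_cap_anns → Spec_generate_gpt_prompt_cat llava_desc coco_gpt_format caption_gpt_format num_boxes coco_cap_anns (generate_gpt_prompt_cat llava_desc coco_gpt_format caption_gpt_format num_boxes coco_cap_anns)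

-- ===== LEMMAS AND PROOFS =====

theorem pvJoinNil (sep : String) : PySem.Str.join sep [] = "" := by
  apply String.toList_inj.mp; simp [PySem.Str.toList_join, PySem.Chars.join_nil]

theorem pvJoinSingle (sep x : String) : PySem.Str.join sep [x] = x := by
  apply String.toList_inj.mp; simp [PySem.Str.toList_join, PySem.Chars.join_singleton]

theorem pvJoinConsCons (sep x y : String) (xs : List String) :
    PySem.Str.join sep (x :: y :: xs) = x ++ sep ++ PySem.Str.join sep (y :: xs) := by
  apply String.toList_inj.mp; simp [PySem.Str.toList_join, PySem.Chars.join_cons_cons]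

theorem pvJoin0Cons (x : String) (xs : List String) :
    PySem.Str.join "" (x :: xs) = x ++ PySem.Str.join "" xs := by
  cases xs with
  | nil => simp [pvJoinSingle, pvJoinNil]
  | cons y ys => rw [pvJoinConsCons]; simp

theorem pvJoin0Append (xs ys : List String) :
    PySem.Str.join "" (xs ++ ys) = PySem.Str.join "" xs ++ PySem.Str.join "" ys := by
  induction xs with
  | nil => simp [pvJoinNil]
  | cons x xs ih => simp [pvJoin0Cons, ih, String.append_assoc]

-- any left-fold that appends g x each step is the concatenation of the pieces
theorem pvFoldAcc {α : Type} (g : α → String) :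
    ∀ (l : List α) (s : String),
      l.foldl (fun a x => a ++ g x) s = s ++ PySem.Str.join "" (l.map g) := by
  intro l
  induction l with
  | nil => intro s; simp [pvJoinNil]
  | cons x xs ih => intro s; simp only [List.foldl_cons, List.map_cons, ih, pvJoin0Cons,
      String.append_assoc]

-- the token and separator of A's loop, as functions
def pvTok (i : Int) : String := "<region" ++ PySem.Int.toStr (i + 1) ++ ">"
def pvSep (n i : Int) : String := if i < n - 2 then ", " else if i = n - 2 then " and " else ""

theorem pvRegionStrA_eq_join (n : Int) :
    pvRegionStrA n =
      PySem.Str.join "" ((PySem.List.pyRange 0 n 1).map (fun i => pvTok i ++ pvSep n i)) := by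
  unfold pvRegionStrA
  have hb : (fun (region_str : String) (i : Int) =>
      let region_str := region_str ++ "<region" ++ PySem.Int.toStr (i + 1) ++ ">"
      if i < n - 2 then region_str ++ ", "
      else if i = n - 2 then region_str ++ " and "
      else region_str)
      = fun (a : String) (i : Int) => a ++ (pvTok i ++ pvSep n i) := by
    funext a i
    simp only [pvTok, pvSep]
    split_ifs <;> simp [String.append_assoc]
  rw [hb, pvFoldAcc]
  simp

-- a left-fold that appends [g x] each step is the seed list followed by the mapped list
theorem pvFoldListAcc {α : Type} (g : α → String) :
    ∀ (l : List α) (ps : List String),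
      l.foldl (fun a x => a ++ [g x]) ps = ps ++ l.map g := by
  intro l
  induction l with
  | nil => intro ps; simp
  | cons x xs ih => intro ps; simp [List.foldl_cons, ih]

-- B's region string, rewritten as the same join of token-plus-separator pieces
theorem pvRegionStrB_eq_join (n : Int) :
    pvRegionStrB n =
      PySem.Str.join "" ((PySem.List.pyRange 0 n 1).map (fun i => pvTok i ++ pvSep n i)) := by
  unfold pvRegionStrB
  by_cases h0 : n ≤ 0
  · rw [if_neg (by omega : ¬ 0 < n), PySem.List.pyRange_one_eq_nil h0]
    simp [pvJoinNil]
  · rw [if_pos (by omega : 0 < n)]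
    by_cases h1 : n = 1
    · subst h1
      have hr : PySem.List.pyRange 0 1 1 = [(0 : Int)] := by
        simpa using PySem.List.pyRange_one_singleton (0 : Int)
      simp only [PySem.List.pyRange_neg_one_eq_nil (by omega : (1:Int) - 2 ≤ 0), hr,
        if_neg (by omega : ¬ (2:Int) ≤ 1)]
      simp [pvJoinSingle, pvTok, pvSep]
    · have hn2 : 2 ≤ n := by omega
      simp only [if_pos hn2]
      have hrev : PySem.List.pyRange (n - 2) 0 (-1)
          = (PySem.List.pyRange 1 (n - 1) 1).reverse := by
        have := PySem.List.pyRange_neg_one_eq_reverse (n - 2) 0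
        rw [show (0 : Int) + 1 = 1 by ring, show n - 2 + 1 = n - 1 by ring] at this
        exact this
      rw [pvFoldListAcc (fun i => "<region" ++ PySem.Int.toStr i ++ ">, "), hrev]
      rw [List.reverse_append, List.map_reverse, List.reverse_reverse]
      -- right side: split [0, n) at n-2
      have hsplit : PySem.List.pyRange 0 n 1
          = PySem.List.pyRange 0 (n - 2) 1 ++ PySem.List.pyRange (n - 2) n 1 :=
        PySem.List.pyRange_one_append 0 (n - 2) n (by omega) (by omega)
      have t1 : PySem.List.pyRange (n - 1) n 1 = [n - 1] := by
        have h := PySem.List.pyRange_one_singleton (n - 1)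
        rw [show n - 1 + 1 = n by ring] at h
        exact h
      have htail : PySem.List.pyRange (n - 2) n 1 = [n - 2, n - 1] := by
        rw [PySem.List.pyRange_one_cons (by omega), show n - 2 + 1 = n - 1 by ring, t1]
      have hsepMid : pvSep n (n - 2) = " and " := by simp [pvSep]
      have hsepLast : pvSep n (n - 1) = "" := by
        simp only [pvSep]; rw [if_neg (by omega), if_neg (by omega)]
      have hsepComma : ∀ i ∈ PySem.List.pyRange 0 (n - 2) 1,
          pvTok i ++ pvSep n i = pvTok i ++ ", " := by
        intro i hi
        rw [PySem.List.mem_pyRange_one] at hi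
        simp only [pvSep]
        rw [if_pos (by omega)]
      rw [hsplit, List.map_append, pvJoin0Append, List.map_congr_left hsepComma, htail]
      -- left prefix: shift index by one
      have hshift : (PySem.List.pyRange 1 (n - 1) 1).map
            (fun i => "<region" ++ PySem.Int.toStr i ++ ">, ")
          = (PySem.List.pyRange 0 (n - 2) 1).map (fun i => pvTok i ++ ", ") := by
        rw [PySem.List.pyRange_one 1 (n - 1), PySem.List.pyRange_one 0 (n - 2),
            show n - 1 - 1 = n - 2 by ring, show n - 2 - 0 = n - 2 by ring,
            List.map_map, List.map_map]
        apply List.map_congr_left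
        intro k _
        simp only [Function.comp, pvTok]
        rw [show 1 + (k : Int) = 0 + (k : Int) + 1 by ring]
        simp [String.append_assoc]
      rw [hshift, pvJoin0Append]
      simp only [List.map_cons, List.map_nil, hsepMid, hsepLast, pvJoin0Cons, pvJoinSingle]
      simp only [pvTok]
      rw [show n - 2 + 1 = n - 1 by ring, show n - 1 + 1 = n by ring]
      simp [pvJoin0Cons, pvJoinSingle, String.append_assoc]

-- ===== VERDICT (by name: the statement is the Claim_ definition above) =====
theorem generate_gpt_prompt_cat_spec : Claim_equal_generate_gpt_prompt_cat := by
  intro llava_desc coco_gpt_format caption_gpt_format num_boxes coco_cap_anns _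
  unfold Spec_generate_gpt_prompt_cat generate_gpt_prompt_cat generate_gpt_prompt_cat_alt
  have hregion : pvRegionStrB num_boxes = pvRegionStrA num_boxes := by
    rw [pvRegionStrA_eq_join, pvRegionStrB_eq_join]
  rw [hregion]
  cases llava_desc with
  | some d =>
      simp only [pvJoin0Cons, pvJoinNil]
      rw [show ("The detailed description of this image:\n\"" : String)
            = "The detailed description of this image:\n" ++ "\"" by decide,
          show ("\"\n" : String) = "\"" ++ "\n" by decide,
          show (".\n" : String) = "." ++ "\n" by decide]
      simp [String.append_assoc]
      rw [show ("\"\n\n" : String) = "\"\n" ++ "\n" by decide, String.append_assoc]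
  | none =>
      simp only [pvJoin0Cons, pvJoinNil]
      have hfold : coco_cap_anns.foldl (fun p coco_cap => p ++ coco_cap ++ "\n")
            ("" ++ "Several descriptions of this image:\n")
          = ("" ++ "Several descriptions of this image:\n")
              ++ PySem.Str.join "" (coco_cap_anns.map (fun cap => cap ++ "\n")) := by
        have hb : (fun (p coco_cap : String) => p ++ coco_cap ++ "\n")
            = fun (a x : String) => a ++ (x ++ "\n") := by
          funext a x; rw [String.append_assoc]
        rw [hb, pvFoldAcc]
      rw [hfold, show (".\n" : String) = "." ++ "\n" by decide]
      simp [String.append_assoc]
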